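-- pv_equiv track=rewrite | github.com/PostAiNL/rmacademy | app.py | calculate_level_data
-- ===== SOURCE A (Python) =====
-- def calculate_level_data(current_xp):
--     levels = [(0, "Starter"), (200, "Bouwer"), (500, "Expert"), (1000, "E-com Boss"), (3000, "Legend"), (5000, "Master"), (10000, "Grandmaster")]
--     current_rank, next_goal, prev_goal, level_num = levels[0][1], levels[1][0], levels[0][0], 1
--     for i, (threshold, title) in enumerate(levels):
--         if current_xp >= threshold:
--             current_rank, level_num, prev_goal = title, i + 1, threshold
--             next_goal = levels[i+1][0] if i + 1 < len(levels) else threshold * 2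
--         else: break
--     return level_num, current_rank, next_goal, prev_goal
-- ===== SOURCE B (Python) =====
-- def calculate_level_data(current_xp):
--     levels = [(0, "Starter"), (200, "Bouwer"), (500, "Expert"), (1000, "E-com Boss"), (3000, "Legend"), (5000, "Master"), (10000, "Grandmaster")]
--     # binary search (bisect_right) for the highest threshold <= current_xp
--     lo, hi = 0, len(levels)
--     while lo < hi:
--         mid = (lo + hi) // 2
--         if levels[mid][0] <= current_xp:
--             lo = mid + 1
--         else:
--             hi = mid
--     idx = lo - 1
--     if idx < 0:
--         return 1, "Starter", 200, 0
--     threshold, title = levels[idx]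
--     next_goal = levels[idx + 1][0] if idx + 1 < len(levels) else threshold * 2
--     return idx + 1, title, next_goal, threshold
-- ===== Notes on version B (the rewrite author's own statement) =====
-- stated objective: alternative
-- what changed: Replaces the linear scan-with-break over the level table by a hand-written binary search (bisect_right) for the highest threshold <= current_xp, then reads level/rank/goals off that index.
import Mathlib
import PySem

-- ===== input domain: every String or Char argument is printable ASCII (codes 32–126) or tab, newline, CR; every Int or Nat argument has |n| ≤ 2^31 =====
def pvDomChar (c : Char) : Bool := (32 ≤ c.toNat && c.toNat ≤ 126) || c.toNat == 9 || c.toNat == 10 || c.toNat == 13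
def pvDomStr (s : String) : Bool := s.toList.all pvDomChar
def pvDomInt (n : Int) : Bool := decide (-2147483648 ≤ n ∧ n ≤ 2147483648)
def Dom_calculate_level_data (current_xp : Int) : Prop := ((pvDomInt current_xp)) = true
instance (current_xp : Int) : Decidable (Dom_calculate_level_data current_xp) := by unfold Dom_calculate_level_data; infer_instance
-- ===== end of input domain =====

-- B replaces A's linear scan-with-break by a hand-written binary search over the threshold table (alternative algorithm, same results).

-- ===== PORT A =====
-- the for-loop over enumerate(levels) with an early break; state = (current_rank, next_goal, prev_goal, level_num)
def pvALoop (xp : Int) (levels : List (Int × String)) :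
    List (Int × (Int × String)) → (String × Int × Int × Int) → String × Int × Int × Int
  | [], st => st
  | (i, (threshold, title)) :: rest, st =>
    if xp ≥ threshold then
      let ng : Int := if i + 1 < (levels.length : Int) then (PySem.List.pyGetD levels (i+1) (0, "")).1 else threshold * 2
      pvALoop xp levels rest (title, ng, threshold, i + 1)
    else st

def calculate_level_data (current_xp : Int) : Int × String × Int × Int :=
  let levels : List (Int × String) :=
    [(0, "Starter"), (200, "Bouwer"), (500, "Expert"), (1000, "E-com Boss"),
     (3000, "Legend"), (5000, "Master"), (10000, "Grandmaster")]
  let init : String × Int × Int × Int :=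
    ((levels.getD 0 (0, "")).2, (levels.getD 1 (0, "")).1, (levels.getD 0 (0, "")).1, 1)
  let st := pvALoop current_xp levels (PySem.List.enumerate levels) init
  (st.2.2.2, st.1, st.2.1, st.2.2.1)

-- ===== PORT B =====
-- while lo < hi: mid = (lo+hi)//2; bisect_right over the thresholds
def pvBsearch (xp : Int) (levels : List (Int × String)) (lo hi : Nat) : Nat :=
  if h : lo < hi then
    let mid := (lo + hi) / 2
    if (levels.getD mid (0, "")).1 ≤ xp then
      pvBsearch xp levels (mid + 1) hi
    else
      pvBsearch xp levels lo mid
  else lo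
termination_by hi - lo
decreasing_by
  · omega
  · omega

def calculate_level_data_alt (current_xp : Int) : Int × String × Int × Int :=
  let levels : List (Int × String) :=
    [(0, "Starter"), (200, "Bouwer"), (500, "Expert"), (1000, "E-com Boss"),
     (3000, "Legend"), (5000, "Master"), (10000, "Grandmaster")]
  let lo := pvBsearch current_xp levels 0 levels.length
  if lo = 0 then (1, "Starter", 200, 0)
  else
    let idx := lo - 1
    let tt := levels.getD idx (0, "")
    let next_goal : Int := if idx + 1 < levels.length then (levels.getD (idx+1) (0, "")).1 else tt.1 * 2
    ((idx : Int) + 1, tt.2, next_goal, tt.1)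

-- ===== PRECONDITION & SPEC =====
def Spec_calculate_level_data (current_xp : Int) (out : Int × String × Int × Int) : Prop := out = calculate_level_data_alt current_xp
instance (current_xp : Int) (out : Int × String × Int × Int) : Decidable (Spec_calculate_level_data current_xp out) := by unfold Spec_calculate_level_data; infer_instance

-- ===== CLAIM (what is proved, stated in full; the proofs are below) =====
def Claim_equal_calculate_level_data : Prop := ∀ (current_xp : Int), Dom_calculate_level_data current_xp → Spec_calculate_level_data current_xp (calculate_level_data current_xp)

-- ===== LEMMAS AND PROOFS =====

-- ===== VERDICT (by name: the statement is the Claim_ definition above) =====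
theorem calculate_level_data_spec : Claim_equal_calculate_level_data := by
  intro xp _
  unfold Spec_calculate_level_data calculate_level_data calculate_level_data_alt
  by_cases h1 : (0:Int) ≤ xp <;> by_cases h2 : (200:Int) ≤ xp <;>
    by_cases h3 : (500:Int) ≤ xp <;> by_cases h4 : (1000:Int) ≤ xp <;>
    by_cases h5 : (3000:Int) ≤ xp <;> by_cases h6 : (5000:Int) ≤ xp <;>
    by_cases h7 : (10000:Int) ≤ xp <;>
    first
      | omega
      | simp [pvBsearch, pvALoop, PySem.List.enumerate, PySem.List.pyGetD,
              PySem.List.pyGet?, PySem.List.pyIdx?, h1, h2, h3, h4, h5, h6, h7]
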